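-- pv_equiv track=rewrite | github.com/egopal/FileProcessing | code2.py | join_multiline_data
-- ===== SOURCE A (Python) =====
-- def join_multiline_data(data):
-- 	"""
-- 		input:
-- 			data: A list of strings
-- 		operation:
-- 			In the lsit of strings, if single line is spread across multiple indexes
-- 			but is surrounded by bracktets then, all that is joined to form a single string
-- 			For eg:-
-- 				This list ["word1 word2","word3 (word4","word5","word6","word7)"] is converted to
-- 				["word1 word2","word3 (word4 word5 word6 word7)"]
-- 		returns:
-- 			Returns a list of all joined string which is spread across multiple lines
-- 	"""
-- 	#  output list
-- 	new_data = []
--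
-- 	# count variable to count the no. of opening and closing brackets
-- 	count = 0
--
-- 	# itegrate over the lsit of data
-- 	for row in range(len(data)):
--
-- 		# if count>0 means ... some bracket is open ... so data would be
-- 		# appended to the previous string only
-- 		if(count>0):
-- 			new_data[-1]+=" "+data[row].strip()
-- 		# if count<=0 then no bracket is open
-- 		else:
-- 			new_data.append(data[row].strip())
--
--
-- 		# iterate over all characters
-- 		for char in range(len(data[row])):
--
-- 			# check if there is any opening bracket and increase count
-- 			if(data[row][char] in {"(","{","[","<"}):
-- 				count+=1
--
-- 			# check if there is any closing bracket and decrease count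
-- 			if(data[row][char] in {")","}","]",">"}):
-- 				count-=1
--
-- 	return new_data
-- ===== SOURCE B (Python) =====
-- def join_multiline_data(data):
-- 	# Pass 1: per-row bracket delta, then the prefix-balance table giving
-- 	# the bracket balance *entering* each row.
-- 	deltas = [sum(1 for c in row if c in "({[<") - sum(1 for c in row if c in ")}]>")
-- 	          for row in data]
-- 	entering = [0]
-- 	for d in deltas[:-1]:
-- 		entering.append(entering[-1] + d)
-- 	# Pass 2: group rows by entering balance.
-- 	out = []
-- 	for row, bal in zip(data, entering):
-- 		if bal <= 0:
-- 			out.append(row.strip())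
-- 		else:
-- 			out[-1] = out[-1] + " " + row.strip()
-- 	return out
-- ===== Notes on version B (the rewrite author's own statement) =====
-- stated objective: alternative
-- what changed: Replaces A's single interleaved scan (running bracket counter updated by an inner index loop while building output) with a two-pass decomposition: first compute each row's net bracket delta by counting, build a prefix-balance table, then a separate grouping pass that reads the precomputed entering balance per row.
import Mathlib
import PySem

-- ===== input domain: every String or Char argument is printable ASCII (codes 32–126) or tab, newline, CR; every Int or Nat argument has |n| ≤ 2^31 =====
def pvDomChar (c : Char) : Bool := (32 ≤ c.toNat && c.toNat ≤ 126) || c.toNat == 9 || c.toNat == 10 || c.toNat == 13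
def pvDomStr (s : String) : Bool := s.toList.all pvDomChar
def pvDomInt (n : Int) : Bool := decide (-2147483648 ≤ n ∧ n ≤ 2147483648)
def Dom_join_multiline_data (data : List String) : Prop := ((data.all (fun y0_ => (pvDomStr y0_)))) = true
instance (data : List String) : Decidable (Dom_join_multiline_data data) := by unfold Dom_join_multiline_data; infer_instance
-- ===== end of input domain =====

-- B replaces A's single interleaved scan with a precomputed prefix-balance table
-- followed by a grouping pass (alternative decomposition, same cost).

-- ===== PORT A =====
def pvOpenA (c : Char) : Bool := c == '(' || c == '{' || c == '[' || c == '<'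
def pvCloseA (c : Char) : Bool := c == ')' || c == '}' || c == ']' || c == '>'

-- inner character loop of A: updates count over the (raw) row
def pvRowCountA (count : Int) (row : String) : Int :=
  row.toList.foldl (fun c ch =>
    let c1 := if pvOpenA ch then c + 1 else c
    if pvCloseA ch then c1 - 1 else c1) count

def join_multiline_data (data : List String) : List String :=
  (data.foldl (fun st row =>
    let nd := if st.2 > 0 then st.1.dropLast ++ [st.1.getLastD "" ++ " " ++ PySem.Str.strip row]
              else st.1 ++ [PySem.Str.strip row]
    (nd, pvRowCountA st.2 row)) (([] : List String), (0 : Int))).1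

-- ===== PORT B =====
def pvDeltaB (row : String) : Int :=
  ((row.toList.countP (fun c => ("({[<".toList).contains c)) : Int)
    - ((row.toList.countP (fun c => (")}]>".toList).contains c)) : Int)

def join_multiline_data_alt (data : List String) : List String :=
  let deltas := data.map pvDeltaB
  let entering := deltas.dropLast.foldl (fun e d => e ++ [e.getLastD 0 + d]) [(0 : Int)]
  (data.zip entering).foldl (fun out p =>
    if p.2 ≤ 0 then out ++ [PySem.Str.strip p.1]
    else out.dropLast ++ [out.getLastD "" ++ " " ++ PySem.Str.strip p.1]) []

-- ===== PRECONDITION & SPEC =====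
def Spec_join_multiline_data (data : List String) (out : List String) : Prop := out = join_multiline_data_alt data
instance (data : List String) (out : List String) : Decidable (Spec_join_multiline_data data out) := by unfold Spec_join_multiline_data; infer_instance

-- ===== CLAIM (what is proved, stated in full; the proofs are below) =====
def Claim_equal_join_multiline_data : Prop := ∀ (data : List String), Dom_join_multiline_data data → Spec_join_multiline_data data (join_multiline_data data)

-- ===== LEMMAS AND PROOFS =====

-- entering balances of the rows, given the balance entering the first row
def pvEnt (c : Int) : List String → List Int
  | [] => []
  | r :: rs => c :: pvEnt (c + pvDeltaB r) rs

-- prefix sums starting from x (strict: first element is x + first delta)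
def pvPsums (x : Int) : List Int → List Int
  | [] => []
  | d :: ds => (x + d) :: pvPsums (x + d) ds

theorem pvRowCountA_eq (row : String) (c : Int) : pvRowCountA c row = c + pvDeltaB row := by
  unfold pvRowCountA pvDeltaB
  have key : ∀ (l : List Char) (c : Int),
      l.foldl (fun c ch =>
        let c1 := if pvOpenA ch then c + 1 else c
        if pvCloseA ch then c1 - 1 else c1) c
      = c + ((l.countP (fun ch => ("({[<".toList).contains ch)) : Int)
          - ((l.countP (fun ch => (")}]>".toList).contains ch)) : Int) := by
    intro l
    induction l with
    | nil => intro c; simp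
    | cons ch t ih =>
      intro c
      have hop : ("({[<".toList).contains ch = pvOpenA ch := by
        have h4 : "({[<".toList = ['(', '{', '[', '<'] := rfl
        rw [h4]; simp [pvOpenA, Bool.beq_eq_decide_eq, Bool.or_assoc]
      have hcl : (")}]>".toList).contains ch = pvCloseA ch := by
        have h4 : ")}]>".toList = [')', '}', ']', '>'] := rfl
        rw [h4]; simp [pvCloseA, Bool.beq_eq_decide_eq, Bool.or_assoc]
      simp only [List.foldl_cons, List.countP_cons, ih, hop, hcl]
      by_cases h1 : pvOpenA ch <;> by_cases h2 : pvCloseA ch <;>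
        simp [h1, h2] <;> omega
  rw [key]; ring

theorem pvEnt_foldl : ∀ (ds : List Int) (pre : List Int) (x : Int),
    ds.foldl (fun e d => e ++ [e.getLastD 0 + d]) (pre ++ [x]) = pre ++ x :: pvPsums x ds := by
  intro ds
  induction ds with
  | nil => intro pre x; simp [pvPsums]
  | cons d ds ih =>
    intro pre x
    have hl : (pre ++ [x]).getLastD 0 = x := by simp
    simp only [List.foldl_cons]
    rw [hl, ih (pre ++ [x]) (x + d)]
    simp [pvPsums]

theorem pvEnt_eq_psums : ∀ (rs : List String) (r : String) (c : Int),
    pvEnt c (r :: rs) = c :: pvPsums c ((List.map pvDeltaB (r :: rs)).dropLast) := by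
  intro rs
  induction rs with
  | nil => intro r c; simp [pvEnt, pvPsums]
  | cons r' rs ih =>
    intro r c
    show c :: pvEnt (c + pvDeltaB r) (r' :: rs) = _
    rw [ih r' (c + pvDeltaB r)]
    simp [pvPsums]

theorem pv_main : ∀ (rows : List String) (acc : List String) (c : Int),
    (rows.foldl (fun st row =>
      let nd := if st.2 > 0 then st.1.dropLast ++ [st.1.getLastD "" ++ " " ++ PySem.Str.strip row]
                else st.1 ++ [PySem.Str.strip row]
      (nd, pvRowCountA st.2 row)) (acc, c)).1
    = (rows.zip (pvEnt c rows)).foldl (fun out p =>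
        if p.2 ≤ 0 then out ++ [PySem.Str.strip p.1]
        else out.dropLast ++ [out.getLastD "" ++ " " ++ PySem.Str.strip p.1]) acc := by
  intro rows
  induction rows with
  | nil => intro acc c; simp [pvEnt]
  | cons r rs ih =>
    intro acc c
    simp only [pvEnt, List.zip_cons_cons, List.foldl_cons]
    rw [ih, pvRowCountA_eq]
    congr 1
    split_ifs with h1 h2 <;> first | rfl | omega

theorem join_multiline_data_eq (data : List String) :
    join_multiline_data data = join_multiline_data_alt data := by
  cases data with
  | nil => rfl
  | cons r rs =>
    have he : ((r :: rs).map pvDeltaB).dropLast.foldl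
        (fun e d => e ++ [e.getLastD 0 + d]) [(0 : Int)]
        = pvEnt 0 (r :: rs) := by
      have h := pvEnt_foldl (((r :: rs).map pvDeltaB).dropLast) [] 0
      simp only [List.nil_append] at h
      rw [h, pvEnt_eq_psums]
    show (List.foldl (fun st row =>
        let nd := if st.2 > 0 then st.1.dropLast ++ [st.1.getLastD "" ++ " " ++ PySem.Str.strip row]
                  else st.1 ++ [PySem.Str.strip row]
        (nd, pvRowCountA st.2 row)) (([] : List String), (0 : Int)) (r :: rs)).1
      = List.foldl (fun out p =>
          if p.2 ≤ 0 then out ++ [PySem.Str.strip p.1]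
          else out.dropLast ++ [out.getLastD "" ++ " " ++ PySem.Str.strip p.1]) []
        ((r :: rs).zip (((r :: rs).map pvDeltaB).dropLast.foldl
          (fun e d => e ++ [e.getLastD 0 + d]) [(0 : Int)]))
    rw [he]
    exact pv_main (r :: rs) [] 0

-- ===== VERDICT (by name: the statement is the Claim_ definition above) =====
theorem join_multiline_data_spec : Claim_equal_join_multiline_data := by
  intro data _
  unfold Spec_join_multiline_data
  exact join_multiline_data_eq data
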